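-- pv_equiv track=rewrite | github.com/ferbetanzo/sudoku-nisq | helper_functions.py | calculate_negated_or_bitstring
-- ===== SOURCE A (Python) =====
-- def calculate_negated_or_bitstring(bitstring_dict, excluded_key):
--     """
--     Calculate the bitwise OR of all bitstrings in the dictionary except the one corresponding to the excluded key,
--     and then return the bitwise NOT of the result.
--
--     Args:
--         bitstring_dict (dict): A dictionary where keys are labels and values are bitstrings.
--         excluded_key (str): The key whose corresponding bitstring should be excluded from the OR operation.
--
--     Returns:
--         str: The bitwise NOT of the OR result of all bitstrings except the excluded one.
--
--     Usage Examples: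
--         >>> bitstrings = {
--         ...     'a': '1100',
--         ...     'b': '1010',
--         ...     'c': '0110'
--         ... }
--         >>> calculate_negated_or_bitstring(bitstrings, 'b')
--         '0001'
--
--         >>> bitstrings2 = {
--         ...     'x': '1111',
--         ...     'y': '0000',
--         ...     'z': '0011'
--         ... }
--         >>> calculate_negated_or_bitstring(bitstrings2, 'x')
--         '1100'
--     """
--     # Initialize the result with zeros of the same length as the bitstrings
--     bit_length = len(next(iter(bitstring_dict.values())))
--     or_result = '0' * bit_length
--
--     # Perform OR operation on all bitstrings except the excluded one
--     for key, bitstring in bitstring_dict.items():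
--         if key != excluded_key:
--             or_result = ''.join(str(int(a) | int(b)) for a, b in zip(or_result, bitstring))
--
--     # Perform NOT operation on the result
--     negated_result = ''.join('1' if bit == '0' else '0' for bit in or_result)
--
--     return negated_result
-- ===== SOURCE B (Python) =====
-- def calculate_negated_or_bitstring(bitstring_dict, excluded_key):
--     # Transposed pass: per bit position, OR the bits of all non-excluded
--     # bitstrings and emit the negated bit directly.
--     bit_length = len(next(iter(bitstring_dict.values())))
--     others = [v for k, v in bitstring_dict.items() if k != excluded_key]
--     out = []
--     for j in range(bit_length):
--         col = 0
--         for v in others: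
--             col |= int(v[j])
--         out.append('1' if col == 0 else '0')
--     return ''.join(out)
-- ===== Notes on version B (the rewrite author's own statement) =====
-- stated objective: alternative
-- what changed: B makes one transposed pass: per bit position it ORs int(bit) of every non-excluded bitstring and emits the negated bit directly, instead of A's per-entry rebuild of the full OR string followed by a separate negation pass; Pre_ excludes the empty dict (A raises StopIteration), non-excluded values with characters other than '0'/'1' (A raises ValueError on non-digits and on other digits returns strings grown by multi-digit int-OR, an artefact), and non-excluded values shorter than the first value (A's zip silently truncates there while B's indexing raises IndexError).
-- outside the precondition, e.g. on calculate_negated_or_bitstring({'a': '96', 'b': '66'}, 'z'): A returns '000', B returns '00'; on calculate_negated_or_bitstring({'a': '10', 'b': '1'}, 'z'): A returns '0', B raises IndexError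
import Mathlib
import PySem

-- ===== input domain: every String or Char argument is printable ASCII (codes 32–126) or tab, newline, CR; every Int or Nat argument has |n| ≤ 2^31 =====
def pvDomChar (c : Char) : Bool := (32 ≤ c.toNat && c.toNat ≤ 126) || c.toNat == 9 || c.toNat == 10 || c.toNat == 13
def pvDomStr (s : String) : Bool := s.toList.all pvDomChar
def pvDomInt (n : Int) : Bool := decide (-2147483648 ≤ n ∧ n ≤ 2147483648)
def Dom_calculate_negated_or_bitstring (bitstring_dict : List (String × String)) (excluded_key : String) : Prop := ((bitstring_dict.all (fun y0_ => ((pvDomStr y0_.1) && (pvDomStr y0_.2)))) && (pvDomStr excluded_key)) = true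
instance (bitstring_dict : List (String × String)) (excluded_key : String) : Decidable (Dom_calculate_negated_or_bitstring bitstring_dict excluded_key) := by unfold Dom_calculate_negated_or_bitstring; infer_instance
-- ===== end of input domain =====

-- B replaces A's per-entry full-string OR rebuilds plus a separate negation pass by one
-- transposed pass: per bit position it emits '1' iff every non-excluded value has '0' there
-- (alternative decomposition, same asymptotic cost).

-- ===== PORT A =====

-- int(c) for a single digit character c (Pre_ restricts the consumed characters to '0'/'1')
def pvCharInt (c : Char) : Int := (c.toNat : Int) - 48

-- ''.join(str(int(a) | int(b)) for a, b in zip(or_result, bitstring))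
def pvOrStep (acc : List Char) (bits : List Char) : List Char :=
  ((acc.zip bits).map (fun p => PySem.Int.toChars (PySem.Int.bor (pvCharInt p.1) (pvCharInt p.2)))).flatten

def calculate_negated_or_bitstring (bitstring_dict : List (String × String)) (excluded_key : String) : String :=
  let d := PySem.Dict.ofList bitstring_dict
  let bit_length := ((PySem.Dict.values d).headD "").toList.length
  let or0 : List Char := List.replicate bit_length '0'
  let orRes := (PySem.Dict.items d).foldl
    (fun acc kv => if kv.1 ≠ excluded_key then pvOrStep acc kv.2.toList else acc) or0
  String.mk (orRes.map (fun bit => if bit = '0' then '1' else '0'))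

-- ===== PORT B =====
-- int(v[j]) is ported as pvCharInt (v.getD j '0'): inside Pre_ every consumed index is in
-- range and the character is a digit, so this is exact there.
def calculate_negated_or_bitstring_alt (bitstring_dict : List (String × String)) (excluded_key : String) : String :=
  let d := PySem.Dict.ofList bitstring_dict
  let bit_length := ((PySem.Dict.values d).headD "").toList.length
  let others := (PySem.Dict.items d).filterMap
    (fun kv => if kv.1 ≠ excluded_key then some kv.2.toList else none)
  String.mk ((List.range bit_length).map (fun j =>
    if others.foldl (fun col v => PySem.Int.bor col (pvCharInt (v.getD j '0'))) 0 = 0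
    then '1' else '0'))

-- ===== PRECONDITION & SPEC =====
-- Pre_ excludes the empty dict (A raises StopIteration) and non-excluded values that contain a
-- character other than '0'/'1' (A raises ValueError on non-digits; on other digits A's int-OR
-- produces multi-digit columns, e.g. '9'|'6' → '15', growing the string — an artefact no
-- bitstring caller relies on) or that are shorter than the first value (A's zip silently
-- truncates the result there, while B's natural indexing raises IndexError); see cites.
def Pre_calculate_negated_or_bitstring (bitstring_dict : List (String × String)) (excluded_key : String) : Prop :=
  bitstring_dict ≠ [] ∧
  ((PySem.Dict.ofList bitstring_dict).items.all
    (fun kv => kv.1 == excluded_key ||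
      (kv.2.toList.all (fun c => c == '0' || c == '1') &&
        decide (((PySem.Dict.ofList bitstring_dict).values.headD "").toList.length ≤ kv.2.toList.length)))) = true
instance (bitstring_dict : List (String × String)) (excluded_key : String) : Decidable (Pre_calculate_negated_or_bitstring bitstring_dict excluded_key) := by unfold Pre_calculate_negated_or_bitstring; infer_instance

def pvWitness_calculate_negated_or_bitstring : (List (String × String)) × String :=
  ([("a", "01")], "b")

def Spec_calculate_negated_or_bitstring (bitstring_dict : List (String × String)) (excluded_key : String) (out : String) : Prop := out = calculate_negated_or_bitstring_alt bitstring_dict excluded_key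
instance (bitstring_dict : List (String × String)) (excluded_key : String) (out : String) : Decidable (Spec_calculate_negated_or_bitstring bitstring_dict excluded_key out) := by unfold Spec_calculate_negated_or_bitstring; infer_instance

-- ===== CLAIM (what is proved, stated in full; the proofs are below) =====
def Claim_equal_calculate_negated_or_bitstring : Prop := ∀ (bitstring_dict : List (String × String)) (excluded_key : String), Dom_calculate_negated_or_bitstring bitstring_dict excluded_key → Pre_calculate_negated_or_bitstring bitstring_dict excluded_key → Spec_calculate_negated_or_bitstring bitstring_dict excluded_key (calculate_negated_or_bitstring bitstring_dict excluded_key)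

-- ===== LEMMAS AND PROOFS =====

-- binary character lists
def pvBin (l : List Char) : Prop := ∀ c ∈ l, c = '0' ∨ c = '1'

def pvOr2 (p : Char × Char) : Char := if p.1 = '1' ∨ p.2 = '1' then '1' else '0'

lemma pvOrStep_eq (a b : List Char) (ha : pvBin a) (hb : pvBin b) :
    pvOrStep a b = (a.zip b).map pvOr2 := by
  induction a generalizing b with
  | nil => simp [pvOrStep]
  | cons c a ih =>
    cases b with
    | nil => simp [pvOrStep]
    | cons d b =>
      have hc := ha c (by simp)
      have hd := hb d (by simp)
      have ha' : pvBin a := fun x hx => ha x (by simp [hx])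
      have hb' : pvBin b := fun x hx => hb x (by simp [hx])
      have := ih b ha' hb'
      simp only [pvOrStep, List.zip_cons_cons, List.map_cons, List.flatten_cons] at this ⊢
      rw [this]
      rcases hc with rfl | rfl <;> rcases hd with rfl | rfl <;>
        simp [pvOr2, pvCharInt, PySem.Int.bor, PySem.Int.toChars] <;> rfl

lemma pvBin_step (a b : List Char) : pvBin ((a.zip b).map pvOr2) := by
  intro c hc
  rcases List.mem_map.1 hc with ⟨p, _, rfl⟩
  unfold pvOr2; split <;> simp

lemma pvBin_eta (s : List Char) (hs : pvBin s) :
    (List.range s.length).map (fun j => if (s.getD j '0' == '1') then '1' else '0') = s := by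
  apply List.ext_getElem
  · simp
  · intro j h1 h2
    simp only [List.getElem_map, List.getElem_range]
    rw [List.getD_eq_getElem s '0' (by simpa using h2)]
    rcases hs s[j] (List.getElem_mem _) with h | h <;> simp [h]

lemma pvFoldlMin_le (l : List Nat) (a : Nat) : l.foldl min a ≤ a := by
  induction l generalizing a with
  | nil => simp
  | cons x l ih => exact le_trans (ih _) (min_le_left _ _)

lemma pvFoldlMin_eq (l : List Nat) (a : Nat) (h : ∀ x ∈ l, a ≤ x) : l.foldl min a = a := by
  induction l generalizing a with
  | nil => rfl
  | cons x l ih =>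
    have hx : a ≤ x := h x (by simp)
    simp only [List.foldl_cons, min_eq_left hx]
    exact ih a (fun y hy => h y (by simp [hy]))

-- A's OR loop, characterised column-wise
lemma pvMainA (vs : List (List Char)) (s : List Char) (hs : pvBin s)
    (hvs : ∀ v ∈ vs, pvBin v) :
    vs.foldl pvOrStep s =
      (List.range ((vs.map List.length).foldl min s.length)).map (fun j =>
        if ((s.getD j '0' == '1') || vs.any (fun v => v.getD j '0' == '1')) then '1' else '0') := by
  induction vs generalizing s with
  | nil =>
    simpa using (pvBin_eta s hs).symm
  | cons v vs ih =>
    have hv : pvBin v := hvs v (by simp)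
    have hvs' : ∀ w ∈ vs, pvBin w := fun w hw => hvs w (by simp [hw])
    have hstep : pvOrStep s v = (s.zip v).map pvOr2 := pvOrStep_eq s v hs hv
    have hlen : ((s.zip v).map pvOr2).length = min s.length v.length := by simp
    have hfold := ih ((s.zip v).map pvOr2) (pvBin_step s v) hvs'
    simp only [List.foldl_cons, hstep, hfold, List.map_cons, hlen]
    apply List.map_congr_left
    intro j hj
    have hjn : j < (vs.map List.length).foldl min (min s.length v.length) := List.mem_range.1 hj
    have hjm : j < min s.length v.length := lt_of_lt_of_le hjn (pvFoldlMin_le _ _)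
    have hjs : j < s.length := lt_of_lt_of_le hjm (min_le_left _ _)
    have hjv : j < v.length := lt_of_lt_of_le hjm (min_le_right _ _)
    have hget : ((s.zip v).map pvOr2).getD j '0' = pvOr2 (s[j], v[j]) := by
      rw [List.getD_eq_getElem _ '0' (by simpa using hjm)]
      simp
    simp only [hget, List.getD_eq_getElem s '0' hjs, List.any_cons,
      List.getD_eq_getElem v '0' hjv]
    rcases hs s[j] (List.getElem_mem _) with h1 | h1 <;>
      rcases hv v[j] (List.getElem_mem _) with h2 | h2 <;>
        simp [pvOr2, h1, h2]

-- B's column fold over Int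
lemma pvColFold (vs : List (List Char)) (j : Nat) (c : Int) (hc : c = 0 ∨ c = 1)
    (hvs : ∀ v ∈ vs, pvBin v) :
    vs.foldl (fun col v => PySem.Int.bor col (pvCharInt (v.getD j '0'))) c =
      if ((c == 1) || vs.any (fun v => v.getD j '0' == '1')) then 1 else 0 := by
  induction vs generalizing c with
  | nil => rcases hc with rfl | rfl <;> simp
  | cons v vs ih =>
    have hv : pvBin v := hvs v (by simp)
    have hvs' : ∀ w ∈ vs, pvBin w := fun w hw => hvs w (by simp [hw])
    have hd : v.getD j '0' = '0' ∨ v.getD j '0' = '1' := by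
      by_cases h : j < v.length
      · exact hv _ (by rw [List.getD_eq_getElem v '0' h]; exact List.getElem_mem _)
      · left; exact List.getD_eq_default _ _ (by omega)
    simp only [List.foldl_cons, List.any_cons]
    have hc' : PySem.Int.bor c (pvCharInt (v.getD j '0')) = 0 ∨
        PySem.Int.bor c (pvCharInt (v.getD j '0')) = 1 := by
      rcases hc with rfl | rfl <;> rcases hd with h | h <;> rw [h] <;> decide
    have hb : (PySem.Int.bor c (pvCharInt (v.getD j '0')) == 1) =
        ((c == 1) || (v.getD j '0' == '1')) := by
      rcases hc with rfl | rfl <;> rcases hd with h | h <;> rw [h] <;> decide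
    rw [ih _ hc' hvs', hb, Bool.or_assoc]
    rfl

-- A's guarded fold over items = plain fold over the filtered values
lemma pvFilterFold (ex : String) (items : List (String × String)) (s : List Char) :
    items.foldl (fun acc kv => if kv.1 ≠ ex then pvOrStep acc kv.2.toList else acc) s =
      (items.filterMap (fun kv => if kv.1 ≠ ex then some kv.2.toList else none)).foldl pvOrStep s := by
  induction items generalizing s with
  | nil => rfl
  | cons kv items ih =>
    by_cases h : kv.1 ≠ ex
    · simp only [List.foldl_cons, List.filterMap_cons, if_pos h, ih]
    · have h' : ¬ (kv.1 ≠ ex) := by simpa using h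
      simp only [List.foldl_cons, List.filterMap_cons, if_neg h', ih]

-- ===== VERDICT (by name: the statement is the Claim_ definition above) =====
theorem calculate_negated_or_bitstring_spec : Claim_equal_calculate_negated_or_bitstring := by
  intro bd ex _hdom hpre
  unfold Spec_calculate_negated_or_bitstring calculate_negated_or_bitstring calculate_negated_or_bitstring_alt
  dsimp only
  obtain ⟨-, hpreb⟩ := hpre
  set d := PySem.Dict.ofList bd with hd
  set L0 := ((PySem.Dict.values d).headD "").toList.length with hL0
  have hitem : ∀ kv ∈ (PySem.Dict.items d), kv.1 ≠ ex →
      pvBin kv.2.toList ∧ L0 ≤ kv.2.toList.length := by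
    intro kv hkv hne
    have h1 := List.all_eq_true.1 hpreb kv hkv
    simp only [Bool.or_eq_true, beq_iff_eq, Bool.and_eq_true, List.all_eq_true,
      decide_eq_true_eq] at h1
    rcases h1 with h1 | ⟨h1, h2⟩
    · exact absurd h1 hne
    · exact ⟨fun c hc => by simpa using h1 c hc, h2⟩
  set vs := (PySem.Dict.items d).filterMap
    (fun kv => if kv.1 ≠ ex then some kv.2.toList else none) with hvs
  have hvsprop : ∀ v ∈ vs, pvBin v ∧ L0 ≤ v.length := by
    intro v hv
    rcases List.mem_filterMap.1 hv with ⟨kv, hkv, hok⟩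
    by_cases h : kv.1 ≠ ex
    · rw [if_pos h] at hok
      obtain rfl := Option.some.inj hok
      exact hitem kv hkv h
    · simp [h] at hok
  have hvsbin : ∀ v ∈ vs, pvBin v := fun v hv => (hvsprop v hv).1
  have h0 : pvBin (List.replicate L0 '0') := by
    intro c hc; left; exact List.eq_of_mem_replicate hc
  rw [pvFilterFold, ← hvs]
  rw [pvMainA vs (List.replicate L0 '0') h0 hvsbin]
  rw [List.map_map]
  simp only [List.length_replicate]
  have hmin : (vs.map List.length).foldl min L0 = L0 := by
    apply pvFoldlMin_eq
    intro x hx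
    rcases List.mem_map.1 hx with ⟨v, hv, rfl⟩
    exact (hvsprop v hv).2
  rw [hmin]
  congr 1
  apply List.map_congr_left
  intro j hj
  have hrep : (List.replicate L0 '0').getD j '0' = '0' := by
    by_cases h : j < L0
    · rw [List.getD_eq_getElem _ '0' (by simpa using h)]; simp
    · exact List.getD_eq_default _ _ (by simpa using h)
  rw [pvColFold vs j 0 (Or.inl rfl) hvsbin]
  simp only [Function.comp, hrep]
  cases vs.any (fun v => v.getD j '0' == '1') <;> simp
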